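-- pv_equiv track=rewrite | github.com/donggyuu/algorithm | algorithm-python/others_naver_test_3_20201220.py.py | count
-- ===== SOURCE A (Python) =====
-- def count(string):
--
--     countA = 0
--     for char in string:
--         if char == 'a':
--             countA += 1
--
--     if (countA % 3 != 0):
--         return 0
--
--     result = 0
--     eachA = countA // 3
--     sum = 0
--
--     tmpMap = {}
--
--     for i in range(len(string)):
--
--         if string[i] == 'a':
--             sum += 1
--
--         if (sum == 2 * eachA and eachA in tmpMap and i < len(string) - 1 and i > 0):
--             result += tmpMap[eachA]
--
--         if sum in tmpMap:
--             tmpMap[sum] += 1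
--         else:
--             tmpMap[sum] = 1
--
--     return result
-- ===== SOURCE B (Python) =====
-- def count(string):
--     idx = [i for i, c in enumerate(string) if c == 'a']
--     total = len(idx)
--     if total % 3 != 0:
--         return 0
--     if total == 0:
--         n = len(string)
--         return 0 if n < 3 else (n - 1) * (n - 2) // 2
--     each = total // 3
--     return (idx[each] - idx[each - 1]) * (idx[2 * each] - idx[2 * each - 1])
-- ===== Notes on version B (the rewrite author's own statement) =====
-- stated objective: simpler
-- what changed: A's second pass maintaining a histogram dict of running prefix counts is replaced by collecting the positions of the counted letter once and returning a direct gap product of the two middle gaps, with a closed-form binomial (n-1)(n-2)//2 for the zero-count case.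
import Mathlib
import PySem

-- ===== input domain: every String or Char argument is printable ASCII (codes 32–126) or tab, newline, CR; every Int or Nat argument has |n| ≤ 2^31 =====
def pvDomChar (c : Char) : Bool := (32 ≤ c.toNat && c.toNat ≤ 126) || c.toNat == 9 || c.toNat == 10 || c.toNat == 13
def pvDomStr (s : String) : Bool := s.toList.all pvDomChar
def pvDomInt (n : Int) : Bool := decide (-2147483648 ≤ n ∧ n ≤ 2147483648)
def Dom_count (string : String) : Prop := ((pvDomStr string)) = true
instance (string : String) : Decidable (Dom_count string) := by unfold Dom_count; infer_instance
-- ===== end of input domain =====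

-- B replaces A's second pass with its prefix-sum histogram dict by a direct gap product over the positions of the 'a's
-- (plus a closed form for the zero-'a' case); equivalence of the RETURN value is proved (neither mutates anything).

-- ===== PORT A =====
-- the body of A's second loop (state: (sum, result, tmpMap)); i indexes the string
def stepA (l : List Char) (eachA : Int) (n : Int) (st : Int × Int × PySem.Dict Int Int) (i : Int) :
    Int × Int × PySem.Dict Int Int :=
  -- i ∈ range(len(string)) is always in range, so pyGetD is exact here
  let sum := if PySem.List.pyGetD l i ' ' = 'a' then st.1 + 1 else st.1
  let result := if sum = 2 * eachA ∧ st.2.2.contains eachA = true ∧ i < n - 1 ∧ i > 0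
    then st.2.1 + st.2.2.getD eachA 0 else st.2.1
  let tmpMap := if st.2.2.contains sum = true then st.2.2.modify sum 0 (· + 1) else st.2.2.insert sum 1
  (sum, result, tmpMap)

def count (string : String) : Int :=
  let countA : Int := string.toList.foldl (fun acc char => if char = 'a' then acc + 1 else acc) 0
  if PySem.Int.mod countA 3 ≠ 0 then 0
  else
    let eachA : Int := PySem.Int.floordiv countA 3
    let n : Int := PySem.Str.len string
    let st := (PySem.List.pyRange 0 n 1).foldl (stepA string.toList eachA n) (0, 0, PySem.Dict.empty)
    st.2.1

-- ===== PORT B =====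
def count_alt (string : String) : Int :=
  let idx : List Int := ((PySem.List.enumerate string.toList 0).filter (fun p => p.2 == 'a')).map (·.1)
  let total : Int := PySem.List.len idx
  if PySem.Int.mod total 3 ≠ 0 then 0
  else if total = 0 then
    let n : Int := PySem.Str.len string
    if n < 3 then 0 else PySem.Int.floordiv ((n - 1) * (n - 2)) 2
  else
    let each : Int := PySem.Int.floordiv total 3
    -- all four indices are in range (0 ≤ each-1 < 2*each ≤ 3*each - 1 = len idx - 1), so pyGetD is exact
    (PySem.List.pyGetD idx each 0 - PySem.List.pyGetD idx (each - 1) 0) *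
      (PySem.List.pyGetD idx (2 * each) 0 - PySem.List.pyGetD idx (2 * each - 1) 0)

-- ===== PRECONDITION & SPEC =====
def Spec_count (string : String) (out : Int) : Prop := out = count_alt string
instance (string : String) (out : Int) : Decidable (Spec_count string out) := by unfold Spec_count; infer_instance

-- ===== CLAIM (what is proved, stated in full; the proofs are below) =====
def Claim_equal_count : Prop := ∀ (string : String), Dom_count string → Spec_count string (count string)

-- ===== LEMMAS AND PROOFS =====

-- number of 'a' among the first k characters
def aCnt (l : List Char) (k : Nat) : Nat := (l.take k).count 'a'

-- how many of the first j loop iterations left the running sum at value v (= A's tmpMap entry at v)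
def cntv (l : List Char) (j : Nat) (v : Int) : Nat :=
  (List.range j).countP (fun j' => decide ((aCnt l (j' + 1) : Int) = v))

-- what iteration j adds to A's result
def contrib (l : List Char) (e : Int) (j : Nat) : Int :=
  if (aCnt l (j + 1) : Int) = 2 * e ∧ 0 < cntv l j e ∧ (j : Int) < (l.length : Int) - 1 ∧ (j : Int) > 0
  then (cntv l j e : Int) else 0

-- the (0-based) positions of the 'a' characters
def positions : List Char → List Nat
  | [] => []
  | c :: cs => if c = 'a' then 0 :: (positions cs).map (· + 1) else (positions cs).map (· + 1)


theorem aCnt_zero (l : List Char) : aCnt l 0 = 0 := by simp [aCnt]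

theorem aCnt_cons_succ (c : Char) (cs : List Char) (k : Nat) :
    aCnt (c :: cs) (k + 1) = aCnt cs k + (if c = 'a' then 1 else 0) := by
  by_cases h : c = 'a' <;> simp [aCnt, List.count_cons, h]

theorem positions_length (l : List Char) : (positions l).length = l.count 'a' := by
  induction l with
  | nil => simp [positions]
  | cons c cs ih => by_cases h : c = 'a' <;> simp [positions, h, List.count_cons, ih]

theorem positions_spec (l : List Char) (m : Nat) (h : m < (positions l).length) :
    (positions l)[m] < l.length ∧ aCnt l (positions l)[m] = m ∧ aCnt l ((positions l)[m] + 1) = m + 1 := by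
  induction l generalizing m with
  | nil => simp [positions] at h
  | cons c cs ih =>
    by_cases hc : c = 'a'
    · match m with
      | 0 => simp [positions, hc, aCnt_zero, aCnt_cons_succ]
      | m + 1 =>
        simp only [positions, hc, if_pos] at h ⊢
        simp only [List.getElem_cons_succ, List.getElem_map]
        have h' : m < (positions cs).length := by simpa using h
        obtain ⟨h1, h2, h3⟩ := ih m h'
        refine ⟨by simpa using h1, ?_, ?_⟩
        · rw [aCnt_cons_succ, h2]; simp
        · rw [aCnt_cons_succ, h3]; simp
    · simp only [positions, hc, if_neg, not_false_iff] at h ⊢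
      simp only [List.getElem_map]
      have h' : m < (positions cs).length := by simpa using h
      obtain ⟨h1, h2, h3⟩ := ih m h'
      refine ⟨by simpa using h1, ?_, ?_⟩
      · rw [aCnt_cons_succ, h2, if_neg hc]; try omega
      · rw [aCnt_cons_succ, h3, if_neg hc]; try omega

theorem aCnt_mono (l : List Char) {k k' : Nat} (h : k ≤ k') : aCnt l k ≤ aCnt l k' := by
  unfold aCnt
  exact List.IsPrefix.count_le 'a' (List.take_prefix_take_left h)

theorem aCnt_thresh (l : List Char) (m : Nat) (h : m < (positions l).length) (k : Nat) :
    m + 1 ≤ aCnt l k ↔ (positions l)[m] + 1 ≤ k := by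
  obtain ⟨h1, h2, h3⟩ := positions_spec l m h
  constructor
  · intro hk
    by_contra hlt
    have : aCnt l k ≤ aCnt l (positions l)[m] := aCnt_mono l (by omega)
    omega
  · intro hk
    have : aCnt l ((positions l)[m] + 1) ≤ aCnt l k := aCnt_mono l hk
    omega

theorem positions_strict (l : List Char) {m m' : Nat} (hm : m < m') (h : m' < (positions l).length) :
    (positions l)[m]'(by omega) < (positions l)[m'] := by
  obtain ⟨h1, h2, h3⟩ := positions_spec l m' h
  have := (aCnt_thresh l m (by omega) (positions l)[m']).mp (by omega)
  omega

theorem positions_ge (l : List Char) (m : Nat) (h : m < (positions l).length) :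
    m ≤ (positions l)[m] := by
  obtain ⟨h1, h2, h3⟩ := positions_spec l m h
  have : aCnt l (positions l)[m] ≤ (positions l)[m] := by
    calc aCnt l (positions l)[m] ≤ (l.take (positions l)[m]).length := List.count_le_length
    _ ≤ (positions l)[m] := by simp
  omega

theorem positions_cons_a (c : Char) (cs : List Char) (hc : c = 'a') :
    positions (c :: cs) = 0 :: (positions cs).map (· + 1) := by simp [positions, hc]

theorem positions_cons_na (c : Char) (cs : List Char) (hc : ¬ c = 'a') :
    positions (c :: cs) = (positions cs).map (· + 1) := by simp [positions, hc]

theorem idx_eq (l : List Char) :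
    ((PySem.List.enumerate l 0).filter (fun p => p.2 == 'a')).map (·.1)
      = (positions l).map (fun (m : Nat) => (m : Int)) := by
  have gen : ∀ (l : List Char) (s : Int),
      ((PySem.List.enumerate l s).filter (fun p => p.2 == 'a')).map (·.1)
        = (positions l).map (fun (m : Nat) => (m : Int) + s) := by
    intro l
    induction l with
    | nil => intro s; simp [positions, PySem.List.enumerate_nil]
    | cons c cs ih =>
      intro s
      rw [PySem.List.enumerate_cons]
      by_cases hc : c = 'a'
      · subst hc
        rw [List.filter_cons, if_pos (show (((s, 'a').2 == 'a') = true) by simp),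
          List.map_cons, ih (s + 1), positions_cons_a 'a' cs rfl, List.map_cons, List.map_map]
        refine List.cons_eq_cons.mpr ⟨by simp, ?_⟩
        apply List.map_congr_left
        intro x _
        simp only [Function.comp_apply]
        push_cast
        ring
      · rw [List.filter_cons, if_neg (show ¬ (((s, c).2 == 'a') = true) by simp [hc]),
          ih (s + 1), positions_cons_na c cs hc, List.map_map]
        apply List.map_congr_left
        intro x _
        simp only [Function.comp_apply]
        push_cast
        ring
  rw [gen l 0]
  apply List.map_congr_left
  intro x _
  ring

theorem aCnt_succ (l : List Char) (j : Nat) (h : j < l.length) :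
    aCnt l (j + 1) = aCnt l j + (if l[j] = 'a' then 1 else 0) := by
  unfold aCnt
  rw [List.take_add_one, List.getElem?_eq_getElem h, List.count_append]
  by_cases hc : l[j] = 'a' <;> simp [hc]

theorem cntv_succ (l : List Char) (j : Nat) (v : Int) :
    cntv l (j + 1) v = cntv l j v + (if (aCnt l (j + 1) : Int) = v then 1 else 0) := by
  by_cases h : (aCnt l (j + 1) : Int) = v <;> simp [cntv, List.range_succ, h]

theorem countP_range_band (lo hi : Nat) (h : lo ≤ hi) (j : Nat) :
    (List.range j).countP (fun x => decide (lo ≤ x ∧ x < hi)) = min j hi - min j lo := by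
  induction j with
  | zero => simp
  | succ j ih =>
    rw [List.range_succ, List.countP_append, ih]
    by_cases hb : lo ≤ j ∧ j < hi <;> simp [hb] <;> omega

theorem sum_map_ite_const {α : Type} (xs : List α) (p : α → Prop) [DecidablePred p] (K : Int) :
    (xs.map (fun x => if p x then K else 0)).sum = K * ((xs.countP (fun x => decide (p x)) : Nat) : Int) := by
  induction xs with
  | nil => simp
  | cons x xs ih => by_cases h : p x <;> simp [h, ih] <;> push_cast <;> ring

-- the loop invariant for A's second pass
theorem invA (l : List Char) (e : Int) (j : Nat) (hj : j ≤ l.length) :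
    ((List.range j).foldl (fun st (jn : Nat) => stepA l e (l.length : Int) st (jn : Int))
        (0, 0, PySem.Dict.empty)) =
      ((aCnt l j : Int), ((List.range j).map (contrib l e)).sum,
        ((List.range j).foldl (fun st (jn : Nat) => stepA l e (l.length : Int) st (jn : Int))
          (0, 0, PySem.Dict.empty)).2.2) ∧
    (∀ v : Int, (((List.range j).foldl (fun st (jn : Nat) => stepA l e (l.length : Int) st (jn : Int))
        (0, 0, PySem.Dict.empty)).2.2).getD v 0 = (cntv l j v : Int)) ∧
    (∀ v : Int, (((List.range j).foldl (fun st (jn : Nat) => stepA l e (l.length : Int) st (jn : Int))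
        (0, 0, PySem.Dict.empty)).2.2).contains v = decide (0 < cntv l j v)) := by
  induction j with
  | zero =>
    refine ⟨by simp [aCnt_zero], ?_, ?_⟩ <;> intro v <;>
      simp [cntv, PySem.Dict.getD_empty, PySem.Dict.contains_empty]
  | succ j ih =>
    have hjlen : j < l.length := by omega
    obtain ⟨h1, h2, h3⟩ := ih (by omega)
    rw [List.range_succ, List.foldl_append, List.foldl_cons, List.foldl_nil]
    rcases hS : (List.range j).foldl (fun st (jn : Nat) => stepA l e (l.length : Int) st (jn : Int))
        (0, 0, PySem.Dict.empty) with ⟨s1, r1, d1⟩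
    rw [hS] at h1 h2 h3
    simp only [Prod.mk.injEq] at h1
    obtain ⟨hs1, hr1, -⟩ := h1
    dsimp only at h2 h3
    have hsum : (if PySem.List.pyGetD l (j : Int) ' ' = 'a' then s1 + 1 else s1)
        = ((aCnt l (j + 1) : Nat) : Int) := by
      rw [PySem.List.pyGetD_natCast, List.getD_eq_getElem l ' ' hjlen, hs1, aCnt_succ l j hjlen]
      by_cases hc : l[j] = 'a' <;> simp [hc]
    have hcond : ((((aCnt l (j + 1) : Nat) : Int)) = 2 * e ∧ d1.contains e = true ∧
          (j : Int) < (l.length : Int) - 1 ∧ (j : Int) > 0)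
        ↔ ((aCnt l (j + 1) : Int) = 2 * e ∧ 0 < cntv l j e ∧ (j : Int) < (l.length : Int) - 1 ∧ (j : Int) > 0) := by
      rw [h3 e, decide_eq_true_eq]
    refine ⟨?_, ?_, ?_⟩
    · simp only [stepA, hsum, Prod.mk.injEq]
      refine ⟨by trivial, ?_, by trivial⟩
      rw [List.map_append, List.sum_append]
      simp only [List.map_cons, List.map_nil, List.sum_cons, List.sum_nil, add_zero]
      by_cases hc : (aCnt l (j + 1) : Int) = 2 * e ∧ 0 < cntv l j e ∧ (j : Int) < (l.length : Int) - 1 ∧ (j : Int) > 0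
      · rw [if_pos (hcond.mpr hc), hr1, h2 e]
        simp only [contrib]
        rw [if_pos hc]
      · rw [if_neg (fun hx => hc (hcond.mp hx)), hr1]
        simp only [contrib]
        rw [if_neg hc, add_zero]
    · intro v
      simp only [stepA, hsum]
      rw [cntv_succ]
      by_cases hin : d1.contains ((aCnt l (j + 1) : Int)) = true
      · rw [if_pos hin, PySem.Dict.getD_modify]
        by_cases hv : v = ((aCnt l (j + 1) : Int))
        · subst hv
          rw [if_pos rfl, h2, if_pos rfl]
          push_cast; ring
        · rw [if_neg hv, h2, if_neg (fun hx => hv hx.symm), Nat.add_zero]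
      · rw [if_neg hin, PySem.Dict.getD_insert]
        rw [h3, decide_eq_true_eq] at hin
        have hz : cntv l j ((aCnt l (j + 1) : Int)) = 0 := by omega
        by_cases hv : v = ((aCnt l (j + 1) : Int))
        · subst hv
          rw [if_pos rfl, if_pos rfl, hz]
          simp
        · rw [if_neg hv, h2, if_neg (fun hx => hv hx.symm), Nat.add_zero]
    · intro v
      simp only [stepA, hsum]
      rw [cntv_succ]
      by_cases hin : d1.contains ((aCnt l (j + 1) : Int)) = true
      · rw [if_pos hin, PySem.Dict.contains_modify, h3]
        have hin' := hin
        rw [h3, decide_eq_true_eq] at hin'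
        by_cases hv : ((aCnt l (j + 1) : Int)) = v
        · rw [if_pos hv]
          subst hv
          simp
        · rw [if_neg hv, Nat.add_zero]
          have hbe : (v == ((aCnt l (j + 1) : Int))) = false := by
            simp only [beq_eq_false_iff_ne]
            exact fun hx => hv hx.symm
          rw [hbe]
          simp
      · rw [if_neg hin, PySem.Dict.contains_insert, h3]
        rw [h3, decide_eq_true_eq] at hin
        have hz : cntv l j ((aCnt l (j + 1) : Int)) = 0 := by omega
        by_cases hv : v = ((aCnt l (j + 1) : Int))
        · subst hv
          simp [hz]
        · have hbe : (v == ((aCnt l (j + 1) : Int))) = false := by simp [hv]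
          rw [hbe, if_neg (fun hx => hv hx.symm), Nat.add_zero]
          simp

theorem sum_band (lo hi : Nat) (K : Int) (n : Nat) (h1 : lo ≤ hi) (h2 : hi ≤ n) :
    ((List.range n).map (fun j => if lo ≤ j ∧ j < hi then K else 0)).sum = K * ((hi : Int) - (lo : Int)) := by
  rw [sum_map_ite_const, countP_range_band lo hi h1 n]
  have e1 : min n hi = hi := by omega
  have e2 : min n lo = lo := by omega
  rw [e1, e2, Nat.cast_sub h1]

theorem sum_tri (c n : Nat) :
    2 * ((List.range n).map (fun j => if j < c ∧ 0 < j then (j : Int) else 0)).sum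
      = ((min n c : Nat) : Int) * (((min n c : Nat) : Int) - 1) := by
  induction n with
  | zero => simp
  | succ n ih =>
    rw [List.range_succ, List.map_append, List.sum_append]
    by_cases hb : n < c ∧ 0 < n
    · have e1 : min n c = n := by omega
      have e2 : min (n + 1) c = n + 1 := by omega
      rw [e1] at ih
      rw [e2]
      simp only [List.map_cons, List.map_nil, List.sum_cons, List.sum_nil, add_zero, if_pos hb]
      push_cast
      push_cast at ih
      linear_combination ih
    · by_cases hn0 : n = 0
      · subst hn0
        simp only [List.range_zero, List.map_nil, List.sum_nil, List.map_cons, List.sum_cons,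
          List.map_nil, List.sum_nil, add_zero, zero_add]
        have : ¬ ((0:Nat) < c ∧ 0 < 0) := by omega
        rw [if_neg this]
        rcases Nat.eq_zero_or_pos c with hc | hc
        · subst hc; simp
        · have : min 1 c = 1 := by omega
          rw [this]; simp
      · have hge : c ≤ n := by omega
        have e2 : min (n + 1) c = min n c := by omega
        rw [e2]
        simp only [List.map_cons, List.map_nil, List.sum_cons, List.sum_nil, add_zero]
        rw [if_neg hb, add_zero]
        exact ih

-- ===== VERDICT (by name: the statement is the Claim_ definition above) =====
theorem aCnt_le (l : List Char) (k : Nat) : aCnt l k ≤ l.count 'a' := by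
  unfold aCnt
  exact (List.take_sublist k l).count_le 'a'

theorem count_spec : Claim_equal_count := by
  unfold Claim_equal_count Spec_count
  intro string _
  unfold count count_alt
  simp only [PySem.List.foldl_ite_add_one, zero_add, PySem.Str.len_eq, PySem.List.len_eq,
    idx_eq, List.length_map, positions_length]
  have hcp : (List.countP (fun x => decide (x = 'a')) string.toList) = string.toList.count 'a' := by
    induction string.toList with
    | nil => rfl
    | cons c cs ih => by_cases hx : c = 'a' <;> simp [hx, List.countP_cons, List.count_cons, ih]
  rw [hcp]
  set l := string.toList with hl
  set t := l.count 'a' with ht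
  by_cases h3 : t % 3 = 0
  case neg =>
    have hA : PySem.Int.mod (↑t) 3 ≠ 0 := by
      rw [show ((3:Int)) = ((3:Nat):Int) by norm_num, PySem.Int.mod_natCast]
      exact_mod_cast h3
    rw [if_pos hA, if_pos hA]
  case pos =>
    obtain ⟨e', he'⟩ : ∃ e', t = 3 * e' := ⟨t / 3, by omega⟩
    have hmodz : ¬ (PySem.Int.mod (↑t) 3 ≠ 0) := by
      rw [show ((3:Int)) = ((3:Nat):Int) by norm_num, PySem.Int.mod_natCast, h3]; simp
    rw [if_neg hmodz, if_neg hmodz]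
    have hfd : PySem.Int.floordiv (↑t) 3 = ((e' : Nat) : Int) := by
      rw [show ((3:Int)) = ((3:Nat):Int) by norm_num, PySem.Int.floordiv_natCast, he']
      norm_num
    rw [hfd]
    have hfold : (PySem.List.pyRange 0 ((l.length : Nat) : Int) 1).foldl
          (stepA l ((e' : Nat) : Int) ((l.length : Nat) : Int)) (0, 0, PySem.Dict.empty)
        = (List.range l.length).foldl
          (fun st (jn : Nat) => stepA l ((e' : Nat) : Int) ((l.length : Nat) : Int) st ((jn : Nat) : Int))
          (0, 0, PySem.Dict.empty) := by
      rw [PySem.List.pyRange_zero_nat, List.foldl_map]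
    rw [hfold]
    obtain ⟨hst, -, -⟩ := invA l ((e' : Nat) : Int) l.length le_rfl
    rw [hst]
    dsimp only
    rcases Nat.eq_zero_or_pos e' with he0 | hepos
    · -- zero-'a' case
      subst he0
      have ht0 : t = 0 := by omega
      rw [show (((0:Nat) : Int)) = (0 : Int) by norm_num]
      have htz : ((t : Nat) : Int) = 0 := by rw [ht0]; norm_num
      rw [if_pos htz]
      have hzero : ∀ j ∈ List.range l.length, contrib l 0 j
          = (if j < l.length - 1 ∧ 0 < j then ((j : Nat) : Int) else 0) := by
        intro j hj
        rw [List.mem_range] at hj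
        have haz : aCnt l (j + 1) = 0 := by
          have := aCnt_le l (j + 1); omega
        have hcv : cntv l j 0 = j := by
          unfold cntv
          have hiff : ∀ x ∈ List.range j, ((decide ((aCnt l (x + 1) : Int) = 0)) = true
              ↔ (fun _ : Nat => true) x = true) := by
            intro x hx
            have : aCnt l (x + 1) = 0 := by have := aCnt_le l (x + 1); omega
            simp [this]
          rw [List.countP_congr hiff, List.countP_true, List.length_range]
        unfold contrib
        by_cases hb : j < l.length - 1 ∧ 0 < j
        · rw [if_pos ⟨by rw [haz]; norm_num, by omega, by omega, by omega⟩, if_pos hb, hcv]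
        · rw [if_neg ?_, if_neg hb]
          rintro ⟨-, hc2, hc3, hc4⟩
          exact hb ⟨by omega, by omega⟩
      rw [List.map_congr_left hzero]
      by_cases hlen : l.length < 3
      · rw [if_pos (by exact_mod_cast hlen)]
        have hz2 : ∀ j ∈ List.range l.length,
            (if j < l.length - 1 ∧ 0 < j then ((j : Nat) : Int) else 0) = (0 : Int) := by
          intro j hj
          rw [List.mem_range] at hj
          rw [if_neg (by omega)]
        rw [List.map_congr_left hz2]
        simp
      · rw [if_neg (by push_cast; omega)]
        have h2S := sum_tri (l.length - 1) l.length
        have hm : min l.length (l.length - 1) = l.length - 1 := by omega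
        rw [hm] at h2S
        have hX : 2 * ((List.range l.length).map
              (fun j => if j < l.length - 1 ∧ 0 < j then ((j : Nat) : Int) else 0)).sum
            = ((l.length : Int) - 1) * ((l.length : Int) - 2) := by
          rw [h2S, Nat.cast_sub (by omega : 1 ≤ l.length)]
          push_cast
          ring
        rw [PySem.Int.floordiv_eq_ediv_of_pos (by norm_num), ← hX]
        omega
    · -- e' ≥ 1 case
      have hPlen : (positions l).length = 3 * e' := by rw [positions_length, ← ht, he']
      have hne : ¬ (((t : Nat) : Int) = 0) := by
        rw [he']; push_cast; omega
      rw [if_neg hne]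
      have hb1 : e' - 1 < (positions l).length := by omega
      have hb2 : e' < (positions l).length := by omega
      have hb3 : 2 * e' - 1 < (positions l).length := by omega
      have hb4 : 2 * e' < (positions l).length := by omega
      have hp12 : (positions l)[e' - 1] < (positions l)[e'] :=
        positions_strict l (by omega) hb2
      have hp34 : (positions l)[2 * e' - 1] < (positions l)[2 * e'] :=
        positions_strict l (by omega) hb4
      have hp23 : (positions l)[e'] ≤ (positions l)[2 * e' - 1] := by
        rcases Nat.lt_or_ge e' (2 * e' - 1) with hx | hx
        · exact le_of_lt (positions_strict l hx hb3)
        · have hxe : e' = 2 * e' - 1 := by omega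
          have : (positions l)[e'] = (positions l)[2 * e' - 1] := by
            congr 1
          exact le_of_eq this
      have hp4len : (positions l)[2 * e'] < l.length := (positions_spec l (2 * e') hb4).1
      have hp3ge : 1 ≤ (positions l)[2 * e' - 1] := by
        have := positions_ge l (2 * e' - 1) hb3; omega
      -- rewrite B's four indexings
      have hg : ∀ (m : Nat) (hm : m < (positions l).length),
          PySem.List.pyGetD ((positions l).map (fun (m : Nat) => (m : Int))) ((m : Nat) : Int) 0
            = (((positions l)[m] : Nat) : Int) := by
        intro m hm
        rw [PySem.List.pyGetD_natCast, List.getD_eq_getElem _ 0 (by simpa using hm), List.getElem_map]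
      have hi1 : ((e' : Nat) : Int) - 1 = ((e' - 1 : Nat) : Int) := by omega
      have hi2 : 2 * ((e' : Nat) : Int) = ((2 * e' : Nat) : Int) := by omega
      have hi3 : 2 * ((e' : Nat) : Int) - 1 = ((2 * e' - 1 : Nat) : Int) := by omega
      rw [hi1, hi3, hi2, hg e' hb2, hg (e' - 1) hb1, hg (2 * e') hb4, hg (2 * e' - 1) hb3]
      -- rewrite A's sum into a band indicator
      have hband : ∀ j ∈ List.range l.length, contrib l ((e' : Nat) : Int) j
          = (if (positions l)[2 * e' - 1] ≤ j ∧ j < (positions l)[2 * e']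
              then (((positions l)[e'] - (positions l)[e' - 1] : Nat) : Int) else 0) := by
        intro j hj
        rw [List.mem_range] at hj
        have hth3 := aCnt_thresh l (2 * e' - 1) hb3 (j + 1)
        have hth4 := aCnt_thresh l (2 * e') hb4 (j + 1)
        have hm3 : 2 * e' - 1 + 1 = 2 * e' := by omega
        rw [hm3] at hth3
        unfold contrib
        by_cases hb : (positions l)[2 * e' - 1] ≤ j ∧ j < (positions l)[2 * e']
        · have hge : 2 * e' ≤ aCnt l (j + 1) := hth3.mpr (by omega)
          have hlt : aCnt l (j + 1) < 2 * e' + 1 := by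
            by_contra hx
            push_neg at hx
            have := hth4.mpr (by omega)
            omega
          have ha : aCnt l (j + 1) = 2 * e' := by omega
          have hcv : cntv l j ((e' : Nat) : Int) = (positions l)[e'] - (positions l)[e' - 1] := by
            unfold cntv
            have hpt : ∀ x ∈ List.range j, ((decide ((aCnt l (x + 1) : Int) = ((e' : Nat) : Int))) = true
                ↔ (decide ((positions l)[e' - 1] ≤ x ∧ x < (positions l)[e'])) = true) := by
              intro x hx
              have ht1 := aCnt_thresh l (e' - 1) hb1 (x + 1)
              have ht2 := aCnt_thresh l e' hb2 (x + 1)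
              have hm1 : e' - 1 + 1 = e' := by omega
              rw [hm1] at ht1
              simp only [decide_eq_true_eq]
              constructor
              · intro hx2
                have hx3 : aCnt l (x + 1) = e' := by exact_mod_cast hx2
                have hA := ht1.mp (by omega)
                have hB : ¬ ((positions l)[e'] + 1 ≤ x + 1) := fun hc => by
                  have := ht2.mpr hc; omega
                exact ⟨by omega, by omega⟩
              · intro hx2
                have hA := ht1.mpr (by omega)
                have hB : aCnt l (x + 1) < e' + 1 := by
                  by_contra hc
                  push_neg at hc
                  have := ht2.mpr (by omega)
                  omega
                have : aCnt l (x + 1) = e' := by omega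
                exact_mod_cast congrArg (fun m => ((m : Nat) : Int)) this
            rw [List.countP_congr hpt, countP_range_band _ _ (le_of_lt hp12) j]
            omega
          rw [if_pos ⟨by rw [ha]; push_cast; ring, by omega, by omega, by omega⟩, if_pos hb, hcv]
        · have hnot : ¬ ((aCnt l (j + 1) : Int) = 2 * ((e' : Nat) : Int)) := by
            intro hx
            have hx' : aCnt l (j + 1) = 2 * e' := by exact_mod_cast hx
            have hA := hth3.mp (by omega)
            have hB : ¬ ((positions l)[2 * e'] + 1 ≤ j + 1) := fun hc => by
              have := hth4.mpr hc; omega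
            exact hb ⟨by omega, by omega⟩
          rw [if_neg (fun hx => hnot hx.1), if_neg hb]
      rw [List.map_congr_left hband, sum_band _ _ _ _ (le_of_lt hp34) (le_of_lt hp4len),
        Nat.cast_sub (le_of_lt hp12)]
      try push_cast
      try ring
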